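-- pv_equiv track=rewrite | github.com/djpalshikar/bom_creation_tool | item_tool.py | removeOptionalContraintsIndex
-- ===== SOURCE A (Python) =====
-- def removeOptionalContraintsIndex(current_item_count, max_count_list, row_options):
--     newIndexList = []
--     row_no = 0
--
--     for i,count in zip(range(len(current_item_count)),current_item_count):
--         if not row_options[i]:
--             newIndexList.append(row_no + current_item_count[i])
--         elif count < (max_count_list[i] - 1):
--            #optional row and index is valid
--             newIndexList.append(row_no + current_item_count[i])
--         row_no  = row_no + (max_count_list[i]-1 if row_options[i] else max_count_list[i])
--     return newIndexList
-- ===== SOURCE B (Python) =====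
-- def removeOptionalContraintsIndex(current_item_count, max_count_list, row_options):
--     n = len(current_item_count)
--     # exclusive prefix-offset table: offsets[i] = starting row number of block i
--     offsets = [0]
--     for i in range(n):
--         offsets.append(offsets[i] + (max_count_list[i] - 1 if row_options[i] else max_count_list[i]))
--     return [offsets[i] + current_item_count[i]
--             for i in range(n)
--             if not row_options[i] or current_item_count[i] < max_count_list[i] - 1]
-- ===== Notes on version B (the rewrite author's own statement) =====
-- stated objective: alternative
-- what changed: Replaces A's single interleaved loop (accumulating the result list and a running row_no together) by two separate passes: first an exclusive prefix-offset table, then a filtering comprehension that emits offsets[i]+count for the kept indices.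
import Mathlib
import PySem

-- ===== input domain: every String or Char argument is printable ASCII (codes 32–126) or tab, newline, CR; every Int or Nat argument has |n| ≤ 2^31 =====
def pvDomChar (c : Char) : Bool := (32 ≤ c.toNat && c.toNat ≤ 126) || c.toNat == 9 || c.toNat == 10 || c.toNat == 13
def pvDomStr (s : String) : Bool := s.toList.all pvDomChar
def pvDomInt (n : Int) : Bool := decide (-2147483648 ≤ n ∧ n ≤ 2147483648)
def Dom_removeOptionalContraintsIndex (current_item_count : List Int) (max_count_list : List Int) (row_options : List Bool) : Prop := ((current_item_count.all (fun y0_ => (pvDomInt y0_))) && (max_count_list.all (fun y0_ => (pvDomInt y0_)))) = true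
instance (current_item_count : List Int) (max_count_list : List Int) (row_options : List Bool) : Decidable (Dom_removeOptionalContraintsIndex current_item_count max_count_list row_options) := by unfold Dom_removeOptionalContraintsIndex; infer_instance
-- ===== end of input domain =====

-- B replaces A's single interleaved accumulator loop by two passes (a prefix-offset
-- table, then a filtering comprehension); objective: alternative decomposition.

-- ===== PORT A =====
-- A's loop `for i,count in zip(range(len(cic)), cic)` as structural recursion over
-- current_item_count carrying the index i, the result list and row_no.
-- Indexing uses List.getD: under Pre_ every index is in range, exactly where
-- Python returns without IndexError.
def pvGoA (cic mcl : List Int) (ro : List Bool) : List Int → Nat → List Int → Int → List Int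
  | [], _, acc, _ => acc
  | count :: rest, i, acc, row_no =>
      let acc' :=
        if ¬ (ro.getD i false) then acc ++ [row_no + cic.getD i 0]
        else if count < mcl.getD i 0 - 1 then acc ++ [row_no + cic.getD i 0]
        else acc
      pvGoA cic mcl ro rest (i + 1) acc'
        (row_no + (if ro.getD i false then mcl.getD i 0 - 1 else mcl.getD i 0))

def removeOptionalContraintsIndex (current_item_count : List Int) (max_count_list : List Int) (row_options : List Bool) : List Int :=
  pvGoA current_item_count max_count_list row_options current_item_count 0 [] 0

-- ===== PORT B =====
-- pass 1 of Source B: the exclusive prefix-offset table (offsets[0] = 0, append per row)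
def pvOffsets (mcl : List Int) (ro : List Bool) (n : Nat) : List Int :=
  (List.range n).foldl
    (fun offs i =>
      offs ++ [offs.getD i 0 + (if ro.getD i false then mcl.getD i 0 - 1 else mcl.getD i 0)])
    [0]

def removeOptionalContraintsIndex_alt (current_item_count : List Int) (max_count_list : List Int) (row_options : List Bool) : List Int :=
  let n := current_item_count.length
  let offsets := pvOffsets max_count_list row_options n
  -- pass 2 of Source B: the filtering comprehension
  (List.range n).filterMap (fun i =>
    if (¬ (row_options.getD i false)) ∨ current_item_count.getD i 0 < max_count_list.getD i 0 - 1
    then some (offsets.getD i 0 + current_item_count.getD i 0)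
    else none)

-- ===== PRECONDITION & SPEC =====
-- Pre_: both programs index row_options[i] and max_count_list[i] for every
-- i < len(current_item_count); shorter lists make Python A (and B) raise IndexError.
def Pre_removeOptionalContraintsIndex (current_item_count : List Int) (max_count_list : List Int) (row_options : List Bool) : Prop :=
  current_item_count.length ≤ max_count_list.length ∧ current_item_count.length ≤ row_options.length
instance (current_item_count : List Int) (max_count_list : List Int) (row_options : List Bool) : Decidable (Pre_removeOptionalContraintsIndex current_item_count max_count_list row_options) := by unfold Pre_removeOptionalContraintsIndex; infer_instance

def pvWitness_removeOptionalContraintsIndex : List Int × List Int × List Bool :=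
  ([0, 1, 2], [3, 3, 3], [false, true, true])

def Spec_removeOptionalContraintsIndex (current_item_count : List Int) (max_count_list : List Int) (row_options : List Bool) (out : List Int) : Prop := out = removeOptionalContraintsIndex_alt current_item_count max_count_list row_options
instance (current_item_count : List Int) (max_count_list : List Int) (row_options : List Bool) (out : List Int) : Decidable (Spec_removeOptionalContraintsIndex current_item_count max_count_list row_options out) := by unfold Spec_removeOptionalContraintsIndex; infer_instance

-- ===== CLAIM (what is proved, stated in full; the proofs are below) =====
def Claim_equal_removeOptionalContraintsIndex : Prop := ∀ (current_item_count : List Int) (max_count_list : List Int) (row_options : List Bool), Dom_removeOptionalContraintsIndex current_item_count max_count_list row_options → Pre_removeOptionalContraintsIndex current_item_count max_count_list row_options → Spec_removeOptionalContraintsIndex current_item_count max_count_list row_options (removeOptionalContraintsIndex current_item_count max_count_list row_options)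

-- ===== LEMMAS AND PROOFS =====

-- the per-row block height and the exclusive prefix sums thereof
def pvStep (mcl : List Int) (ro : List Bool) (i : Nat) : Int :=
  if ro.getD i false then mcl.getD i 0 - 1 else mcl.getD i 0

def pvR (mcl : List Int) (ro : List Bool) (i : Nat) : Int :=
  (((List.range i).map (pvStep mcl ro))).sum

lemma pvR_succ (mcl : List Int) (ro : List Bool) (i : Nat) :
    pvR mcl ro (i + 1) = pvR mcl ro i + pvStep mcl ro i := by
  simp [pvR, List.range_succ]

lemma pvOffsets_eq (mcl : List Int) (ro : List Bool) (n : Nat) :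
    pvOffsets mcl ro n = (List.range (n + 1)).map (pvR mcl ro) := by
  induction n with
  | zero => simp [pvOffsets, pvR]
  | succ n ih =>
      have hget : ((List.range (n + 1)).map (pvR mcl ro)).getD n 0 = pvR mcl ro n := by
        rw [List.getD_eq_getElem?_getD]
        simp
      rw [pvOffsets, List.range_succ, List.foldl_append]
      rw [pvOffsets] at ih
      rw [ih, List.foldl_cons, List.foldl_nil, hget]
      rw [show (n + 1) + 1 = (n + 1) + 1 from rfl, List.range_succ (n := n + 1), List.map_append]
      simp [pvR_succ, pvStep]

lemma pvOffsets_getD (mcl : List Int) (ro : List Bool) (n i : Nat) (h : i < n + 1) :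
    (pvOffsets mcl ro n).getD i 0 = pvR mcl ro i := by
  rw [pvOffsets_eq, List.getD_eq_getElem?_getD]
  simp [h]

-- A's recursion computes acc ++ the filtered tail from index i, with row_no = pvR i
lemma pvGoA_eq (cic mcl : List Int) (ro : List Bool) :
    ∀ (suffix : List Int) (i : Nat) (acc : List Int),
      suffix = cic.drop i →
      pvGoA cic mcl ro suffix i acc (pvR mcl ro i) =
        acc ++ (List.range' i (cic.length - i)).filterMap (fun j =>
          if (¬ (ro.getD j false)) ∨ cic.getD j 0 < mcl.getD j 0 - 1
          then some (pvR mcl ro j + cic.getD j 0)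
          else none) := by
  intro suffix
  induction suffix with
  | nil =>
      intro i acc h
      have hlen : cic.length ≤ i := by
        have := congrArg List.length h
        simp at this
        omega
      simp [pvGoA, Nat.sub_eq_zero_of_le hlen]
  | cons count rest ih =>
      intro i acc h
      have hi : i < cic.length := by
        by_contra hle
        rw [List.drop_eq_nil_of_le (by omega)] at h
        exact List.cons_ne_nil _ _ h
      have hdrop : cic.drop i = cic[i] :: cic.drop (i + 1) := List.drop_eq_getElem_cons hi
      rw [hdrop] at h
      obtain ⟨hcount, hrest⟩ := List.cons_eq_cons.mp h
      have hgetD : cic.getD i 0 = count := by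
        rw [hcount, List.getD_eq_getElem?_getD]
        simp [hi]
      have hrange : List.range' i (cic.length - i) =
          i :: List.range' (i + 1) (cic.length - (i + 1)) := by
        have h2 : cic.length - i = (cic.length - (i + 1)) + 1 := by omega
        rw [h2, List.range'_succ]
      rw [pvGoA]
      rw [show pvR mcl ro i + (if ro.getD i false then mcl.getD i 0 - 1 else mcl.getD i 0)
            = pvR mcl ro (i + 1) by rw [pvR_succ]; rfl]
      rw [hrange]
      by_cases hro : ro.getD i false
      · have hro' : ro[i]?.getD false = true := by
          rw [← List.getD_eq_getElem?_getD]; exact hro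
        rw [if_neg (by simp [hro'])]
        by_cases hc : count < mcl.getD i 0 - 1
        · have hcond : (¬ (ro.getD i false)) ∨ cic.getD i 0 < mcl.getD i 0 - 1 :=
            Or.inr (by rw [hgetD]; exact hc)
          rw [if_pos hc, ih (i + 1) _ hrest, List.filterMap_cons, if_pos hcond]
          simp
        · have hmcl : mcl[i]?.getD 0 ≤ count + 1 := by
            rw [← List.getD_eq_getElem?_getD]; omega
          have hcond : ¬ ((¬ (ro.getD i false)) ∨ cic.getD i 0 < mcl.getD i 0 - 1) := by
            rw [hgetD]
            simp
            exact ⟨hro', hmcl⟩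
          rw [if_neg hc, ih (i + 1) _ hrest, List.filterMap_cons, if_neg hcond]
      · have hcond : (¬ (ro.getD i false)) ∨ cic.getD i 0 < mcl.getD i 0 - 1 := Or.inl hro
        rw [if_pos hro, ih (i + 1) _ hrest, List.filterMap_cons, if_pos hcond]
        simp

lemma range'_zero_eq_range (n : Nat) : List.range' 0 n = List.range n := by
  simp [List.range_eq_range']

theorem removeOptionalContraintsIndex_spec : Claim_equal_removeOptionalContraintsIndex := by
  intro cic mcl ro _ _
  unfold Spec_removeOptionalContraintsIndex removeOptionalContraintsIndex removeOptionalContraintsIndex_alt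
  have hA := pvGoA_eq cic mcl ro cic 0 [] (by simp)
  rw [show pvR mcl ro 0 = 0 by simp [pvR]] at hA
  rw [hA]
  simp only [Nat.sub_zero, range'_zero_eq_range, List.nil_append]
  apply List.filterMap_congr
  intro i hi
  have hi' : i < cic.length := List.mem_range.mp hi
  rw [pvOffsets_getD mcl ro cic.length i (by omega)]
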